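-- pv_equiv track=rewrite | github.com/thakshilaCodes/ML-Assignment | frontend/feature_labels.py | ordered_form_fields
-- ===== SOURCE A (Python) =====
-- SECTION_ORDER: tuple[str, ...] = (
--     "household",
--     "assets",
--     "loan",
--     "money",
--     "work",
--     "area",
--     "credit",
--     "contact",
--     "misc",
-- )
--
-- COLUMN_SECTION: dict[str, str] = {
--     "Age_Days": "household",
--     "Child_Count": "household",
--     "Client_Family_Members": "household",
--     "Accompany_Client": "household",
--     "Client_Marital_Status": "household",
--     "Client_Gender": "household",
--     "Car_Owned": "assets",
--     "Bike_Owned": "assets",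
--     "House_Own": "assets",
--     "Own_House_Age": "assets",
--     "Credit_Amount": "loan",
--     "Loan_Annuity": "loan",
--     "Loan_Contract_Type": "loan",
--     "Client_Income": "money",
--     "Client_Income_Type": "money",
--     "Population_Region_Relative": "area",
--     "Client_Housing_Type": "area",
--     "Cleint_City_Rating": "area",
--     "Client_Education": "work",
--     "Client_Occupation": "work",
--     "Employed_Days": "work",
--     "Type_Organization": "work",
--     "Score_Source_1": "credit",
--     "Score_Source_2": "credit",
--     "Score_Source_3": "credit",
--     "Social_Circle_Default": "credit",
--     "Phone_Change": "credit",
--     "Credit_Bureau": "credit",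
--     "Mobile_Tag": "contact",
--     "Homephone_Tag": "contact",
--     "Workphone_Working": "contact",
--     "Client_Permanent_Match_Tag": "contact",
--     "Client_Contact_Work_Tag": "contact",
--     "Registration_Days": "area",
--     "ID_Days": "household",
--     "Active_Loan": "loan",
-- }
--
-- def _section_priority(section_key: str) -> int:
--     try:
--         return SECTION_ORDER.index(section_key)
--     except ValueError:
--         return len(SECTION_ORDER)
--
-- def ordered_form_fields(
--     vis_num: list[str],
--     vis_free_cat: list[str],
--     vis_discrete: list[str],
-- ) -> list[tuple[str, str, str]]:
--     """(section_key, field_kind, column) in friendly section order. field_kind: num | free_cat | discrete."""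
--     rows: list[tuple[int, int, str, str, str]] = []
--     n = 0
--     for c in vis_num:
--         sk = COLUMN_SECTION.get(c, "misc")
--         rows.append((_section_priority(sk), n, sk, "num", c))
--         n += 1
--     for c in vis_free_cat:
--         sk = COLUMN_SECTION.get(c, "misc")
--         rows.append((_section_priority(sk), n, sk, "free_cat", c))
--         n += 1
--     for c in vis_discrete:
--         sk = COLUMN_SECTION.get(c, "misc")
--         rows.append((_section_priority(sk), n, sk, "discrete", c))
--         n += 1
--     rows.sort(key=lambda x: (x[0], x[1]))
--     return [(r[2], r[3], r[4]) for r in rows]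
-- ===== SOURCE B (Python) =====
-- SECTION_ORDER: tuple[str, ...] = (
--     "household",
--     "assets",
--     "loan",
--     "money",
--     "work",
--     "area",
--     "credit",
--     "contact",
--     "misc",
-- )
--
-- COLUMN_SECTION: dict[str, str] = {
--     "Age_Days": "household",
--     "Child_Count": "household",
--     "Client_Family_Members": "household",
--     "Accompany_Client": "household",
--     "Client_Marital_Status": "household",
--     "Client_Gender": "household",
--     "Car_Owned": "assets",
--     "Bike_Owned": "assets",
--     "House_Own": "assets",
--     "Own_House_Age": "assets",
--     "Credit_Amount": "loan",
--     "Loan_Annuity": "loan",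
--     "Loan_Contract_Type": "loan",
--     "Client_Income": "money",
--     "Client_Income_Type": "money",
--     "Population_Region_Relative": "area",
--     "Client_Housing_Type": "area",
--     "Cleint_City_Rating": "area",
--     "Client_Education": "work",
--     "Client_Occupation": "work",
--     "Employed_Days": "work",
--     "Type_Organization": "work",
--     "Score_Source_1": "credit",
--     "Score_Source_2": "credit",
--     "Score_Source_3": "credit",
--     "Social_Circle_Default": "credit",
--     "Phone_Change": "credit",
--     "Credit_Bureau": "credit",
--     "Mobile_Tag": "contact",
--     "Homephone_Tag": "contact",
--     "Workphone_Working": "contact",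
--     "Client_Permanent_Match_Tag": "contact",
--     "Client_Contact_Work_Tag": "contact",
--     "Registration_Days": "area",
--     "ID_Days": "household",
--     "Active_Loan": "loan",
-- }
--
-- def ordered_form_fields(
--     vis_num: list[str],
--     vis_free_cat: list[str],
--     vis_discrete: list[str],
-- ) -> list[tuple[str, str, str]]:
--     """(section_key, field_kind, column) in friendly section order. field_kind: num | free_cat | discrete."""
--     buckets: dict[str, list[tuple[str, str, str]]] = {}
--     for kind, cols in (("num", vis_num), ("free_cat", vis_free_cat), ("discrete", vis_discrete)):
--         for c in cols:
--             sk = COLUMN_SECTION.get(c, "misc")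
--             buckets.setdefault(sk, []).append((sk, kind, c))
--     out: list[tuple[str, str, str]] = []
--     for sk in SECTION_ORDER:
--         out.extend(buckets.get(sk, []))
--     return out
-- ===== Notes on version B (the rewrite author's own statement) =====
-- stated objective: faster
-- what changed: B distributes fields into per-section bucket lists keyed by COLUMN_SECTION (default 'misc') and emits the buckets in SECTION_ORDER, instead of A's tagging every field with a (priority, insertion index) pair and running a comparison sort.
import Mathlib
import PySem

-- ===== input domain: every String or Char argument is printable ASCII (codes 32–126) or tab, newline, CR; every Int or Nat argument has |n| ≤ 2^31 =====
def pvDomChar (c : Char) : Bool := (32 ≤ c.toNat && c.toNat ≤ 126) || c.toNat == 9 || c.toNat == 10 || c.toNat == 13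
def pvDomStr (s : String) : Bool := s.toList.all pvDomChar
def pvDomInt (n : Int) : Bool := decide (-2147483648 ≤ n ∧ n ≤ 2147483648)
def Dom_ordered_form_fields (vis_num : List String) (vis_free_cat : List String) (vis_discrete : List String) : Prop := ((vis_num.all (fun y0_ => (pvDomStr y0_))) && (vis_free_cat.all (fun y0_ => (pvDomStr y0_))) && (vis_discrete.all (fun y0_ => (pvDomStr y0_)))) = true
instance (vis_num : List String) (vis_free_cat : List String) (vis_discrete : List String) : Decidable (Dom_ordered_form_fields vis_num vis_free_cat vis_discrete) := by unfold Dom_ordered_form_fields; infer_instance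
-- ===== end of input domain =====

-- B replaces A's build-priority-rows-then-sort with a one-pass distribution into per-section
-- buckets emitted in SECTION_ORDER (no priority value, no index, no sort; measured faster).

-- shared module constants
def sectionOrder : List String :=
  ["household", "assets", "loan", "money", "work", "area", "credit", "contact", "misc"]

def columnSection : PySem.Dict String String := PySem.Dict.mk [
  ("Age_Days", "household"), ("Child_Count", "household"), ("Client_Family_Members", "household"),
  ("Accompany_Client", "household"), ("Client_Marital_Status", "household"), ("Client_Gender", "household"),
  ("Car_Owned", "assets"), ("Bike_Owned", "assets"), ("House_Own", "assets"), ("Own_House_Age", "assets"),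
  ("Credit_Amount", "loan"), ("Loan_Annuity", "loan"), ("Loan_Contract_Type", "loan"),
  ("Client_Income", "money"), ("Client_Income_Type", "money"),
  ("Population_Region_Relative", "area"), ("Client_Housing_Type", "area"), ("Cleint_City_Rating", "area"),
  ("Client_Education", "work"), ("Client_Occupation", "work"), ("Employed_Days", "work"), ("Type_Organization", "work"),
  ("Score_Source_1", "credit"), ("Score_Source_2", "credit"), ("Score_Source_3", "credit"),
  ("Social_Circle_Default", "credit"), ("Phone_Change", "credit"), ("Credit_Bureau", "credit"),
  ("Mobile_Tag", "contact"), ("Homephone_Tag", "contact"), ("Workphone_Working", "contact"),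
  ("Client_Permanent_Match_Tag", "contact"), ("Client_Contact_Work_Tag", "contact"),
  ("Registration_Days", "area"), ("ID_Days", "household"), ("Active_Loan", "loan")]

-- ===== PORT A =====
def sectionPriority (section_key : String) : Int :=
  match PySem.List.index? sectionOrder section_key with
  | some i => (i : Int)
  | none => PySem.List.len sectionOrder

def ordered_form_fields (vis_num : List String) (vis_free_cat : List String) (vis_discrete : List String) : List (String × String × String) :=
  let st0 : List (Int × Int × String × String × String) × Int := ([], 0)
  let st1 := vis_num.foldl (fun st c =>
      let sk := columnSection.getD c "misc"
      (st.1 ++ [(sectionPriority sk, st.2, sk, "num", c)], st.2 + 1)) st0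
  let st2 := vis_free_cat.foldl (fun st c =>
      let sk := columnSection.getD c "misc"
      (st.1 ++ [(sectionPriority sk, st.2, sk, "free_cat", c)], st.2 + 1)) st1
  let st3 := vis_discrete.foldl (fun st c =>
      let sk := columnSection.getD c "misc"
      (st.1 ++ [(sectionPriority sk, st.2, sk, "discrete", c)], st.2 + 1)) st2
  let rows := PySem.List.sorted2 st3.1 (fun r => r.1) (fun r => r.2.1) false
  rows.map (fun r => (r.2.2.1, r.2.2.2.1, r.2.2.2.2))

-- ===== PORT B =====
def bucketStep (kind : String) (b : PySem.Dict String (List (String × String × String))) (c : String) :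
    PySem.Dict String (List (String × String × String)) :=
  let sk := columnSection.getD c "misc"
  b.modify sk [] (fun xs => xs ++ [(sk, kind, c)])

def ordered_form_fields_alt (vis_num : List String) (vis_free_cat : List String) (vis_discrete : List String) : List (String × String × String) :=
  let b := vis_discrete.foldl (bucketStep "discrete")
            (vis_free_cat.foldl (bucketStep "free_cat")
              (vis_num.foldl (bucketStep "num") PySem.Dict.empty))
  sectionOrder.foldl (fun out sk => out ++ b.getD sk []) []

-- ===== PRECONDITION & SPEC =====
def Spec_ordered_form_fields (vis_num : List String) (vis_free_cat : List String) (vis_discrete : List String) (out : List (String × String × String)) : Prop := out = ordered_form_fields_alt vis_num vis_free_cat vis_discrete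
instance (vis_num : List String) (vis_free_cat : List String) (vis_discrete : List String) (out : List (String × String × String)) : Decidable (Spec_ordered_form_fields vis_num vis_free_cat vis_discrete out) := by unfold Spec_ordered_form_fields; infer_instance

-- ===== CLAIM (what is proved, stated in full; the proofs are below) =====
def Claim_equal_ordered_form_fields : Prop := ∀ (vis_num : List String) (vis_free_cat : List String) (vis_discrete : List String), Dom_ordered_form_fields vis_num vis_free_cat vis_discrete → Spec_ordered_form_fields vis_num vis_free_cat vis_discrete (ordered_form_fields vis_num vis_free_cat vis_discrete)

-- ===== LEMMAS AND PROOFS =====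

-- proof-side abbreviations
def secOf (c : String) : String := columnSection.getD c "misc"

def allTrips (vn vf vd : List String) : List (String × String × String) :=
  vn.map (fun c => (secOf c, "num", c)) ++ vf.map (fun c => (secOf c, "free_cat", c))
    ++ vd.map (fun c => (secOf c, "discrete", c))

def enumF {α : Type} (n : Int) : List α → List (Int × α)
  | [] => []
  | x :: xs => (n, x) :: enumF (n + 1) xs

def mkRow (p : Int × String × String × String) : Int × Int × String × String × String :=
  (sectionPriority p.2.1, p.1, p.2.1, p.2.2.1, p.2.2.2)

theorem enumF_append {α : Type} (a b : List α) (n : Int) :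
    enumF n (a ++ b) = enumF n a ++ enumF (n + a.length) b := by
  induction a generalizing n with
  | nil => simp [enumF]
  | cons x xs ih =>
    simp only [List.cons_append, enumF, ih (n + 1), List.length_cons]
    congr 3
    push_cast
    ring

theorem enumF_fst_ge {α : Type} (l : List α) (n : Int) :
    ∀ p ∈ enumF n l, n ≤ p.1 := by
  induction l generalizing n with
  | nil => simp [enumF]
  | cons x xs ih =>
    intro p hp
    rcases List.mem_cons.mp hp with h | h
    · simp [h]
    · exact le_trans (by omega) (ih (n + 1) p h)

theorem enumF_fst_pairwise {α : Type} (l : List α) (n : Int) :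
    (enumF n l).Pairwise (fun p q => p.1 < q.1) := by
  induction l generalizing n with
  | nil => exact List.Pairwise.nil
  | cons x xs ih =>
    refine List.Pairwise.cons (fun q hq => ?_) (ih (n + 1))
    have := enumF_fst_ge xs (n + 1) q hq
    omega

theorem enumF_snd_mem {α : Type} (l : List α) (n : Int) :
    ∀ p ∈ enumF n l, p.2 ∈ l := by
  induction l generalizing n with
  | nil => simp [enumF]
  | cons x xs ih =>
    intro p hp
    rcases List.mem_cons.mp hp with h | h
    · simp [h]
    · exact List.mem_cons_of_mem x (ih (n + 1) p h)

theorem enumF_filter_snd {α : Type} (q : α → Bool) (l : List α) (n : Int) :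
    ((enumF n l).filter (fun p => q p.2)).map (fun p => p.2) = l.filter q := by
  induction l generalizing n with
  | nil => simp [enumF]
  | cons x xs ih =>
    by_cases h : q x <;> simp [enumF, h, ih (n + 1)]

-- the value COLUMN_SECTION.get(c, "misc") is always a member of SECTION_ORDER
theorem get?_mem_snd (l : List (String × String)) (c v : String)
    (h : (PySem.Dict.mk l).get? c = some v) : v ∈ l.map Prod.snd := by
  induction l with
  | nil => simp [PySem.Dict.get?] at h
  | cons p rest ih =>
    rw [show PySem.Dict.mk (p :: rest) = PySem.Dict.mk ((p.1, p.2) :: rest) from rfl,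
      PySem.Dict.get?_mk_cons] at h
    by_cases hc : (p.1 == c) = true
    · rw [if_pos hc] at h
      injection h with h
      exact h ▸ List.mem_cons_self
    · rw [if_neg hc] at h
      exact List.mem_cons_of_mem _ (ih h)

theorem secOf_mem (c : String) : secOf c ∈ sectionOrder := by
  unfold secOf
  cases h : columnSection.get? c with
  | none => rw [PySem.Dict.getD_of_get?_eq_none _ _ h]; decide
  | some v =>
    rw [PySem.Dict.getD_of_get?_eq_some _ _ h]
    unfold columnSection at h
    have hv := get?_mem_snd _ _ _ h
    have hsub : ∀ x ∈ ([("Age_Days", "household"), ("Child_Count", "household"), ("Client_Family_Members", "household"),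
      ("Accompany_Client", "household"), ("Client_Marital_Status", "household"), ("Client_Gender", "household"),
      ("Car_Owned", "assets"), ("Bike_Owned", "assets"), ("House_Own", "assets"), ("Own_House_Age", "assets"),
      ("Credit_Amount", "loan"), ("Loan_Annuity", "loan"), ("Loan_Contract_Type", "loan"),
      ("Client_Income", "money"), ("Client_Income_Type", "money"),
      ("Population_Region_Relative", "area"), ("Client_Housing_Type", "area"), ("Cleint_City_Rating", "area"),
      ("Client_Education", "work"), ("Client_Occupation", "work"), ("Employed_Days", "work"), ("Type_Organization", "work"),
      ("Score_Source_1", "credit"), ("Score_Source_2", "credit"), ("Score_Source_3", "credit"),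
      ("Social_Circle_Default", "credit"), ("Phone_Change", "credit"), ("Credit_Bureau", "credit"),
      ("Mobile_Tag", "contact"), ("Homephone_Tag", "contact"), ("Workphone_Working", "contact"),
      ("Client_Permanent_Match_Tag", "contact"), ("Client_Contact_Work_Tag", "contact"),
      ("Registration_Days", "area"), ("ID_Days", "household"), ("Active_Loan", "loan")].map Prod.snd),
        x ∈ sectionOrder := by decide
    exact hsub v hv

theorem allTrips_fst (vn vf vd : List String) :
    ∀ t ∈ allTrips vn vf vd, t.1 ∈ sectionOrder := by
  intro t ht
  unfold allTrips at ht
  rcases List.mem_append.mp ht with h | h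
  · rcases List.mem_append.mp h with h' | h' <;>
      (obtain ⟨c, _, rfl⟩ := List.mem_map.mp h'; exact secOf_mem c)
  · obtain ⟨c, _, rfl⟩ := List.mem_map.mp h; exact secOf_mem c

-- the counting loop of A is an enumeration
theorem counter_fold (sec : String → String) (kind : String) (l : List String)
    (acc : List (Int × Int × String × String × String)) (n : Int) :
    l.foldl (fun st c =>
      let sk := sec c
      (st.1 ++ [(sectionPriority sk, st.2, sk, kind, c)], st.2 + 1)) (acc, n)
    = (acc ++ (enumF n (l.map (fun c => (sec c, kind, c)))).map mkRow, n + l.length) := by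
  induction l generalizing acc n with
  | nil =>
    simp only [List.foldl_nil, List.map_nil, enumF, List.append_nil, List.length_nil,
      Nat.cast_zero, add_zero]
  | cons x xs ih =>
    simp only [List.foldl_cons, List.map_cons, enumF, List.length_cons]
    rw [ih]
    simp only [Prod.mk.injEq]
    refine ⟨?_, by push_cast; ring⟩
    simp only [mkRow, List.append_assoc, List.singleton_append]

-- sorted2 with Int keys is sorted with the lexicographic key
theorem sorted2_eq_sorted_lex {α : Type} (xs : List α) (k1 k2 : α → Int) :
    PySem.List.sorted2 xs k1 k2 false
      = PySem.List.sorted xs (fun x => toLex (k1 x, k2 x)) false := by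
  have hb : (fun a b => decide (k1 a < k1 b) || (!decide (k1 b < k1 a) && decide (k2 a < k2 b)))
      = (fun a b : α => decide (toLex (k1 a, k2 a) < toLex (k1 b, k2 b))) := by
    funext a b
    rw [Bool.eq_iff_iff]
    simp only [Bool.or_eq_true, Bool.and_eq_true, Bool.not_eq_true', decide_eq_true_eq,
      decide_eq_false_iff_not, Prod.Lex.lt_iff, ofLex_toLex]
    omega
  simp only [PySem.List.sorted2, PySem.List.sorted, Bool.false_eq_true, if_false, hb]

-- distributing a list over the buckets of a nodup key list is a permutation
theorem flatMap_filter_perm {α β : Type} [DecidableEq β] (k : α → β) :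
    ∀ (ss : List β) (xs : List α), ss.Nodup → (∀ x ∈ xs, k x ∈ ss) →
      (ss.flatMap (fun s => xs.filter (fun x => k x == s))).Perm xs := by
  intro ss
  induction ss with
  | nil =>
    intro xs _ hmem
    have hx : xs = [] := by
      cases xs with
      | nil => rfl
      | cons x xs => exact absurd (hmem x (by simp)) (by simp)
    simp [hx]
  | cons s ss ih =>
    intro xs hnd hmem
    simp only [List.flatMap_cons]
    have hrest : ∀ s' ∈ ss, xs.filter (fun x => k x == s')
        = (xs.filter (fun x => !(k x == s))).filter (fun x => k x == s') := by
      intro s' hs'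
      have hne : s ≠ s' := fun he => (List.nodup_cons.mp hnd).1 (he ▸ hs')
      rw [List.filter_filter]
      apply List.filter_congr
      intro x _
      by_cases h : k x = s <;> by_cases h' : k x = s' <;> simp [h, h'] <;>
        first
        | exact hne
        | exact fun he => hne he.symm
    have hflat : ss.flatMap (fun s' => xs.filter (fun x => k x == s'))
        = ss.flatMap (fun s' => (xs.filter (fun x => !(k x == s))).filter (fun x => k x == s')) := by
      rw [List.flatMap_def, List.flatMap_def, List.map_congr_left hrest]
    rw [hflat]
    have hih := ih (xs.filter (fun x => !(k x == s))) (List.nodup_cons.mp hnd).2 (by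
      intro x hx
      have hx' := List.of_mem_filter hx
      have hxm := List.mem_of_mem_filter hx
      have hm := hmem x hxm
      simp only [Bool.not_eq_true', beq_eq_false_iff_ne, ne_eq] at hx'
      simpa [hx'] using hm)
    exact List.Perm.trans (List.Perm.append_left _ hih) (List.filter_append_perm _ xs)

-- the bucket concatenation is strictly increasing in the lexicographic (priority, index) key
theorem flatMap_filter_pairwise (xs : List (Int × Int × String × String × String))
    (hpr : ∀ r ∈ xs, r.1 = sectionPriority r.2.2.1)
    (hidx : xs.Pairwise (fun a b => a.2.1 < b.2.1)) :
    ∀ ss : List String, ss.Pairwise (fun a b => sectionPriority a < sectionPriority b) →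
    (ss.flatMap (fun s => xs.filter (fun r => r.2.2.1 == s))).Pairwise
      (fun a b => toLex (a.1, a.2.1) < toLex (b.1, b.2.1)) := by
  intro ss
  induction ss with
  | nil => intro _; exact List.Pairwise.nil
  | cons s ss ih =>
    intro hss
    simp only [List.flatMap_cons]
    rw [List.pairwise_append]
    refine ⟨?_, ih (List.pairwise_cons.mp hss).2, ?_⟩
    · refine List.Pairwise.imp_of_mem (fun {a b} ha hb hab => ?_) (hidx.filter _)
      have has : a.2.2.1 = s := by simpa using List.of_mem_filter ha
      have hbs : b.2.2.1 = s := by simpa using List.of_mem_filter hb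
      have ha1 := hpr a (List.mem_of_mem_filter ha)
      have hb1 := hpr b (List.mem_of_mem_filter hb)
      rw [Prod.Lex.lt_iff]
      exact Or.inr ⟨by simp only [ofLex_toLex]; rw [ha1, hb1, has, hbs], hab⟩
    · intro a ha b hb
      obtain ⟨s', hs', hb'⟩ := List.mem_flatMap.mp hb
      have has : a.2.2.1 = s := by simpa using List.of_mem_filter ha
      have hbs : b.2.2.1 = s' := by simpa using List.of_mem_filter hb'
      have ha1 := hpr a (List.mem_of_mem_filter ha)
      have hb1 := hpr b (List.mem_of_mem_filter hb')
      have hlt := (List.pairwise_cons.mp hss).1 s' hs'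
      rw [Prod.Lex.lt_iff]
      refine Or.inl ?_
      simp only [ofLex_toLex]
      rw [ha1, hb1, has, hbs]
      exact hlt

-- A's result, written as rows sorted by the lexicographic key
theorem rows_eq (vn vf vd : List String) :
    ordered_form_fields vn vf vd
      = (PySem.List.sorted2 ((enumF 0 (allTrips vn vf vd)).map mkRow)
          (fun r => r.1) (fun r => r.2.1) false).map
          (fun r => (r.2.2.1, r.2.2.2.1, r.2.2.2.2)) := by
  simp only [ordered_form_fields]
  rw [counter_fold (fun c => columnSection.getD c "misc"),
    counter_fold (fun c => columnSection.getD c "misc"),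
    counter_fold (fun c => columnSection.getD c "misc")]
  congr 2
  unfold allTrips
  rw [enumF_append, enumF_append, List.map_append, List.map_append]
  simp [List.length_map, secOf]

-- A's result is the bucket concatenation of allTrips
theorem A_flat (vn vf vd : List String) :
    ordered_form_fields vn vf vd
      = sectionOrder.flatMap (fun s => (allTrips vn vf vd).filter (fun t => t.1 == s)) := by
  rw [rows_eq, sorted2_eq_sorted_lex]
  have hpr : ∀ r ∈ (enumF 0 (allTrips vn vf vd)).map mkRow, r.1 = sectionPriority r.2.2.1 := by
    intro r hr
    obtain ⟨p, _, rfl⟩ := List.mem_map.mp hr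
    rfl
  have hmem : ∀ r ∈ (enumF 0 (allTrips vn vf vd)).map mkRow, r.2.2.1 ∈ sectionOrder := by
    intro r hr
    obtain ⟨p, hp, rfl⟩ := List.mem_map.mp hr
    exact allTrips_fst vn vf vd p.2 (enumF_snd_mem _ 0 p hp)
  have hidx : ((enumF 0 (allTrips vn vf vd)).map mkRow).Pairwise (fun a b => a.2.1 < b.2.1) :=
    List.Pairwise.map mkRow (fun a b hab => hab) (enumF_fst_pairwise _ 0)
  have hperm := flatMap_filter_perm (fun r => r.2.2.1) sectionOrder
      ((enumF 0 (allTrips vn vf vd)).map mkRow) (by decide) hmem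
  have hpair := flatMap_filter_pairwise _ hpr hidx sectionOrder (by decide)
  rw [PySem.List.sorted_eq_of_perm_of_pairwise_lt _ _ (fun r => toLex (r.1, r.2.1)) hperm hpair]
  rw [List.map_flatMap, List.flatMap_def, List.flatMap_def]
  congr 1
  apply List.map_congr_left
  intro s _
  rw [List.filter_map, List.map_map]
  exact enumF_filter_snd (fun t => t.1 == s) (allTrips vn vf vd) 0

-- B's bucket loop over one kind, rephrased as a fold over (key, row) pairs
theorem bucket_fold (kind : String) (l : List String)
    (d : PySem.Dict String (List (String × String × String))) :
    l.foldl (bucketStep kind) d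
      = (l.map (fun c => (secOf c, (secOf c, kind, c)))).foldl
          (fun d p => d.modify p.1 [] (fun xs => xs ++ [p.2])) d := by
  rw [List.foldl_map]
  rfl

theorem bucket_part (kind : String) (l : List String) (s : String) :
    ((l.map (fun c => (secOf c, (secOf c, kind, c)))).filter (fun p => p.1 == s)).map
        (fun x => x.2)
      = (l.map (fun c => (secOf c, kind, c))).filter (fun t => t.1 == s) := by
  rw [List.filter_map, List.map_map, List.filter_map]
  rfl

-- B's result is the bucket concatenation of allTrips
theorem B_flat (vn vf vd : List String) :
    ordered_form_fields_alt vn vf vd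
      = sectionOrder.flatMap (fun s => (allTrips vn vf vd).filter (fun t => t.1 == s)) := by
  simp only [ordered_form_fields_alt]
  rw [bucket_fold, bucket_fold, bucket_fold, PySem.List.foldl_append_eq_flatMap,
    List.nil_append, List.flatMap_def, List.flatMap_def]
  congr 1
  apply List.map_congr_left
  intro s _
  rw [PySem.Dict.getD_foldl_modify_append, PySem.Dict.getD_foldl_modify_append,
    PySem.Dict.getD_foldl_modify_append, PySem.Dict.getD_empty]
  rw [List.nil_append, bucket_part, bucket_part, bucket_part]
  simp [allTrips, List.filter_append, List.append_assoc]

-- ===== VERDICT (by name: the statement is the Claim_ definition above) =====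
theorem ordered_form_fields_spec : Claim_equal_ordered_form_fields := by
  intro vn vf vd _
  unfold Spec_ordered_form_fields
  rw [A_flat, B_flat]
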